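-- pv_equiv track=rewrite | github.com/ryanshi42/Advent-of-Code-2021 | day3_2.py | OxygenMode
-- ===== SOURCE A (Python) =====
-- def OxygenMode(lst):
--     d = {}
--     for a in lst:
--         if not a in d:
--             d[a]=1
--         else:
--             d[a]+=1
--     returnList = [k for k,v in d.items() if v==max(d.values())]
--     if len(returnList) > 1:
--         return 1
--     else:
--         return returnList[0]
-- ===== SOURCE B (Python) =====
-- def OxygenMode(lst):
--     counts = {}
--     for a in lst:
--         counts[a] = counts.get(a, 0) + 1
--     common = sorted(counts.items(), key=lambda kv: kv[1], reverse=True)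
--     if len(common) >= 2 and common[1][1] == common[0][1]:
--         return 1
--     return common[0][0]
-- ===== Notes on version B (the rewrite author's own statement) =====
-- stated objective: faster
-- what changed: A recomputes max(d.values()) inside the comprehension and filters all maximal keys; B sorts the count table by count descending once and just peeks at the top two entries.
-- outside the precondition, e.g. on OxygenMode([]): A raises IndexError, B raises IndexError
import Mathlib
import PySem

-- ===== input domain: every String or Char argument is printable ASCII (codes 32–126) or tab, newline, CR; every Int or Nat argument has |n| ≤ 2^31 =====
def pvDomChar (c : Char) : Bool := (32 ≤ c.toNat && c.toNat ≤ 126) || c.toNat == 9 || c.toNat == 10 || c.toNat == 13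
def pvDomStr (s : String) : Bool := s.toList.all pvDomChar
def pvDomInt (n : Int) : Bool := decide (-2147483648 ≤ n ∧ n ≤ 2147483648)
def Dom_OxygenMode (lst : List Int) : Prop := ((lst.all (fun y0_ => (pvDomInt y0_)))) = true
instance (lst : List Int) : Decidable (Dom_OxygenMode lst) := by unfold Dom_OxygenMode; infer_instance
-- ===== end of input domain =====

-- B replaces A's max-then-filter-all-maxima scan by a count-sorted table peeked at its top two entries;
-- equal return values on every nonempty list (both raise IndexError on []).

-- ===== PORT A =====
def OxygenMode (lst : List Int) : Int :=
  let d : PySem.Dict Int Int := lst.foldl (fun d a =>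
    if d.contains a then d.insert a (d.getD a 0 + 1) else d.insert a 1) PySem.Dict.empty
  -- [k for k,v in d.items() if v == max(d.values())]  (max over the nonempty values list = some value)
  let returnList : List Int :=
    (d.items.filter (fun kv => decide (PySem.List.max? d.values (fun v => v) = some kv.2))).map Prod.fst
  if returnList.length > 1 then 1
  else match PySem.List.pyGet? returnList 0 with
       | some k => k
       | none => 0  -- returnList[0]: IndexError on empty input, excluded by Pre_

-- ===== PORT B =====
def OxygenMode_alt (lst : List Int) : Int :=
  let counts : PySem.Dict Int Int := lst.foldl (fun d a => d.insert a (d.getD a 0 + 1)) PySem.Dict.empty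
  -- common = sorted(counts.items(), key=lambda kv: kv[1], reverse=True); peek the top two entries
  match PySem.List.sorted counts.items (fun kv => kv.2) true with
  | p0 :: p1 :: _ => if p1.2 = p0.2 then 1 else p0.1
  | [p0] => p0.1
  | [] => 0  -- common[0]: IndexError on empty input, excluded by Pre_

-- ===== PRECONDITION & SPEC =====
-- Pre_ excludes exactly the empty list, on which both Pythons raise IndexError.
def Pre_OxygenMode (lst : List Int) : Prop := lst ≠ []
instance (lst : List Int) : Decidable (Pre_OxygenMode lst) := by unfold Pre_OxygenMode; infer_instance
def pvWitness_OxygenMode : List Int := [1, 1, 2]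

def Spec_OxygenMode (lst : List Int) (out : Int) : Prop := out = OxygenMode_alt lst
instance (lst : List Int) (out : Int) : Decidable (Spec_OxygenMode lst out) := by unfold Spec_OxygenMode; infer_instance

-- ===== CLAIM (what is proved, stated in full; the proofs are below) =====
def Claim_equal_OxygenMode : Prop := ∀ (lst : List Int), Dom_OxygenMode lst → Pre_OxygenMode lst → Spec_OxygenMode lst (OxygenMode lst)

-- ===== LEMMAS AND PROOFS =====

theorem getD_zero_of_not_contains (d : PySem.Dict Int Int) (a : Int) (h : d.contains a = false) :
    d.getD a 0 = 0 := by
  unfold PySem.Dict.getD PySem.Dict.get? PySem.Dict.contains at *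
  simp only [List.any_eq_false] at h
  rw [List.find?_eq_none.mpr h]
  rfl

theorem stepA_eq :
    (fun (d : PySem.Dict Int Int) (a : Int) =>
      if d.contains a then d.insert a (d.getD a 0 + 1) else d.insert a 1)
    = (fun (d : PySem.Dict Int Int) (a : Int) => d.insert a (d.getD a 0 + 1)) := by
  funext d a
  by_cases h : d.contains a
  · simp [h]
  · simp only [Bool.not_eq_true] at h
    simp [h, getD_zero_of_not_contains d a h]

theorem items_nodup (lst : List Int) : (PySem.Dict.counter lst).items.Nodup := by
  rw [PySem.Dict.items_counter]
  exact (PySem.Set.nodup_ofList lst).map (fun a b h => congrArg Prod.fst h)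

theorem core (its : List (Int × Int)) (hnd : its.Nodup) (m : Int)
    (hmax : PySem.List.max? (its.map (fun x => x.2)) (fun v => v) = some m) :
    (if ((its.filter (fun kv => decide (PySem.List.max? (its.map (fun x => x.2)) (fun v => v) = some kv.2))).map Prod.fst).length > 1
      then (1 : Int)
      else match PySem.List.pyGet? ((its.filter (fun kv => decide (PySem.List.max? (its.map (fun x => x.2)) (fun v => v) = some kv.2))).map Prod.fst) 0 with
        | some k => k
        | none => 0)
    = (match PySem.List.sorted its (fun kv => kv.2) true with
       | p0 :: p1 :: _ => if p1.2 = p0.2 then (1 : Int) else p0.1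
       | [p0] => p0.1
       | [] => 0) := by
  have hub : ∀ p ∈ its, p.2 ≤ m := by
    intro p hp
    exact PySem.List.max?_isMax hmax p.2 (List.mem_map_of_mem hp)
  have hmem : ∃ p ∈ its, p.2 = m := by
    have := PySem.List.max?_mem hmax
    simpa using this
  have hfilter : its.filter (fun kv => decide (PySem.List.max? (its.map (fun x => x.2)) (fun v => v) = some kv.2))
      = its.filter (fun kv => decide (kv.2 = m)) := by
    apply List.filter_congr
    intro kv _
    rw [hmax]
    simp [eq_comm]
  rw [hfilter]
  have hcount : (PySem.List.sorted its (fun kv => kv.2) true).countP (fun kv => decide (kv.2 = m))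
      = (its.filter (fun kv => decide (kv.2 = m))).length := by
    rw [(PySem.List.sorted_perm its (fun kv => kv.2) true).countP_eq]
    exact List.countP_eq_length_filter
  have hFpos : 0 < (its.filter (fun kv => decide (kv.2 = m))).length := by
    obtain ⟨q, hq, hqm⟩ := hmem
    exact List.length_pos_of_mem (List.mem_filter.mpr ⟨hq, by simp [hqm]⟩)
  by_cases hlen : 1 < (its.filter (fun kv => decide (kv.2 = m))).length
  · -- tie: at least two maximal entries; both sides return 1
    rw [if_pos (by simpa using hlen)]
    have hlen2 : 2 ≤ (PySem.List.sorted its (fun kv => kv.2) true).length := by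
      have h1 : (its.filter (fun kv => decide (kv.2 = m))).length ≤ its.length :=
        List.length_filter_le _ _
      have h2 : (PySem.List.sorted its (fun kv => kv.2) true).length = its.length :=
        (PySem.List.sorted_perm its (fun kv => kv.2) true).length_eq
      omega
    obtain ⟨p0, p1, t, hseq⟩ : ∃ p0 p1 t, PySem.List.sorted its (fun kv => kv.2) true = p0 :: p1 :: t := by
      cases hs : PySem.List.sorted its (fun kv => kv.2) true with
      | nil => rw [hs] at hlen2; simp at hlen2
      | cons p0 rest =>
        cases rest with
        | nil => rw [hs] at hlen2; simp at hlen2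
        | cons p1 t => exact ⟨p0, p1, t, rfl⟩
    rw [hseq]
    have hp0its : p0 ∈ its := (PySem.List.mem_sorted its (fun kv => kv.2) true p0).mp (hseq ▸ List.mem_cons_self ..)
    have hp0m : p0.2 = m := by
      obtain ⟨q, hq, hqm⟩ := hmem
      have h1 : q.2 ≤ p0.2 := by simpa using PySem.List.key_head_sorted_rev_ge its (fun kv => kv.2) hseq q hq
      have h2 := hub p0 hp0its
      omega
    have hp1m : p1.2 = m := by
      by_contra hne
      have hp1its : p1 ∈ its := (PySem.List.mem_sorted its (fun kv => kv.2) true p1).mp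
        (hseq ▸ List.mem_cons_of_mem _ (List.mem_cons_self ..))
      have hp1lt : p1.2 < m := lt_of_le_of_ne (hub p1 hp1its) hne
      have hpw := PySem.List.sorted_pairwise_rev its (fun kv => kv.2)
      rw [hseq] at hpw
      have ht : ∀ y ∈ t, y.2 ≤ p1.2 := (List.pairwise_cons.mp (List.pairwise_cons.mp hpw).2).1
      have hc0 : t.countP (fun kv => decide (kv.2 = m)) = 0 := by
        apply List.countP_eq_zero.mpr
        intro y hy
        have := ht y hy
        simp only [decide_eq_true_eq]
        omega
      rw [hseq] at hcount
      simp only [List.countP_cons, hc0] at hcount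
      have h0 : (decide (p0.2 = m) : Bool) = true := by simp [hp0m]
      have h1 : (decide (p1.2 = m) : Bool) = false := by simp [hne]
      rw [h0, h1] at hcount
      simp at hcount
      omega
    simp [hp1m, hp0m]
  · -- unique maximum: both sides return its key
    have hF1 : (its.filter (fun kv => decide (kv.2 = m))).length = 1 := by omega
    obtain ⟨q, hFq⟩ := List.length_eq_one_iff.mp hF1
    rw [if_neg (by simpa using hlen), hFq]
    have hqmem := List.mem_filter.mp (hFq ▸ List.mem_cons_self ..)
    have hsne : PySem.List.sorted its (fun kv => kv.2) true ≠ [] := by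
      intro h
      rw [(PySem.List.sorted_eq_nil_iff _ _ _).mp h] at hqmem
      exact absurd hqmem.1 (List.not_mem_nil)
    cases hseq : PySem.List.sorted its (fun kv => kv.2) true with
    | nil => exact absurd hseq hsne
    | cons p0 rest =>
      have hp0its : p0 ∈ its := (PySem.List.mem_sorted its (fun kv => kv.2) true p0).mp (hseq ▸ List.mem_cons_self ..)
      have hp0m : p0.2 = m := by
        obtain ⟨q', hq', hqm'⟩ := hmem
        have h1 : q'.2 ≤ p0.2 := by simpa using PySem.List.key_head_sorted_rev_ge its (fun kv => kv.2) hseq q' hq'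
        have h2 := hub p0 hp0its
        omega
      have hp0q : p0 = q := by
        have : p0 ∈ its.filter (fun kv => decide (kv.2 = m)) :=
          List.mem_filter.mpr ⟨hp0its, by simp [hp0m]⟩
        rw [hFq] at this
        simpa using this
      cases rest with
      | nil => simp [PySem.List.pyGet?, PySem.List.pyIdx?, hp0q]
      | cons p1 t =>
        have hp1ne : p1.2 ≠ p0.2 := by
          intro heq
          have hp1its : p1 ∈ its := (PySem.List.mem_sorted its (fun kv => kv.2) true p1).mp
            (hseq ▸ List.mem_cons_of_mem _ (List.mem_cons_self ..))
          have hp1q : p1 = q := by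
            have : p1 ∈ its.filter (fun kv => decide (kv.2 = m)) :=
              List.mem_filter.mpr ⟨hp1its, by simp [heq ▸ hp0m]⟩
            rw [hFq] at this
            simpa using this
          have hsnd : (PySem.List.sorted its (fun kv => kv.2) true).Nodup :=
            ((PySem.List.sorted_perm its (fun kv => kv.2) true).nodup_iff).mpr hnd
          rw [hseq] at hsnd
          have : p0 ≠ p1 := by
            have := (List.nodup_cons.mp hsnd).1
            intro h
            exact this (h ▸ List.mem_cons_self ..)
          exact this (hp0q.trans hp1q.symm)
        rw [hp0q] at hp1ne
        simp [PySem.List.pyGet?, PySem.List.pyIdx?, hp0q, hp1ne]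

-- ===== VERDICT (by name: the statement is the Claim_ definition above) =====
theorem OxygenMode_spec : Claim_equal_OxygenMode := by
  intro lst _ hpre
  unfold Spec_OxygenMode OxygenMode OxygenMode_alt
  rw [stepA_eq, PySem.Dict.foldl_insert_getD_add_one_eq_counter]
  simp only [PySem.Dict.values]
  have hne : (PySem.Dict.counter lst).items ≠ [] := by
    rw [PySem.Dict.items_counter]
    cases lst with
    | nil => exact absurd rfl hpre
    | cons a t =>
      intro h
      have : a ∈ PySem.Set.ofList (a :: t) := (PySem.Set.mem_ofList _ _).mpr (List.mem_cons_self ..)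
      rw [List.map_eq_nil_iff.mp h] at this
      exact absurd this List.not_mem_nil
  obtain ⟨m, hmax⟩ : ∃ m, PySem.List.max? ((PySem.Dict.counter lst).items.map (fun x => x.2)) (fun v => v) = some m := by
    cases hm : PySem.List.max? ((PySem.Dict.counter lst).items.map (fun x => x.2)) (fun v => v) with
    | none =>
      rw [PySem.List.max?_eq_none_iff] at hm
      exact absurd (List.map_eq_nil_iff.mp hm) hne
    | some m => exact ⟨m, rfl⟩
  exact core (PySem.Dict.counter lst).items (items_nodup lst) m hmax
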